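-- pv_equiv track=rewrite | github.com/JOHLC/ha-torque-2.0 | custom_components/torque/sensor.py | _determine_icon
-- ===== SOURCE A (Python) =====
-- def _determine_icon(name: str) -> str | None:
--     """Determine appropriate icon for the sensor.
--
--     Args:
--         name: Sensor name
--
--     Returns:
--         Icon string or None for default
--     """
--     if not name:
--         return None
--
--     name_lower = name.lower()
--
--     # Temperature related
--     if any(temp in name_lower for temp in ["temp", "temperature"]):
--         if "coolant" in name_lower:
--             return "mdi:coolant-temperature"
--         elif "air" in name_lower or "intake" in name_lower:
--             return "mdi:thermometer"
--         else:
--             return "mdi:thermometer"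
--
--     # Speed related
--     elif "speed" in name_lower:
--         return "mdi:speedometer"
--
--     # Engine related
--     elif any(eng in name_lower for eng in ["rpm", "engine"]):
--         return "mdi:engine"
--
--     # Fuel related
--     elif "fuel" in name_lower:
--         return "mdi:gas-station"
--
--     # Voltage/electrical
--     elif any(elec in name_lower for elec in ["volt", "battery"]):
--         return "mdi:car-battery"
--
--     return None
-- ===== SOURCE B (Python) =====
-- # B: flat keyword->icon map; collect ALL matching icons in one pass, take the
-- # highest-priority one, then refine the thermometer case to coolant-temperature.
-- _KEYWORD_ICONS = {
--     "temp": "mdi:thermometer",       # "temperature" contains "temp", one key suffices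
--     "speed": "mdi:speedometer",
--     "rpm": "mdi:engine",
--     "engine": "mdi:engine",
--     "fuel": "mdi:gas-station",
--     "volt": "mdi:car-battery",
--     "battery": "mdi:car-battery",
-- }
--
--
-- def _determine_icon(name: str) -> str | None:
--     lowered = name.lower()
--     hits = [icon for kw, icon in _KEYWORD_ICONS.items() if kw in lowered]
--     if not hits:
--         return None
--     icon = hits[0]
--     if icon == "mdi:thermometer" and "coolant" in lowered:
--         return "mdi:coolant-temperature"
--     return icon
-- ===== Notes on version B (the rewrite author's own statement) =====
-- stated objective: simpler
-- what changed: Replaced the nested if/elif branch chain by a flat keyword-to-icon map: one comprehension collects every matching icon, the first hit (map order = priority) is taken, and a single refinement step upgrades thermometer to coolant-temperature; the redundant temperature/air/intake checks disappear.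
import Mathlib
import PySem

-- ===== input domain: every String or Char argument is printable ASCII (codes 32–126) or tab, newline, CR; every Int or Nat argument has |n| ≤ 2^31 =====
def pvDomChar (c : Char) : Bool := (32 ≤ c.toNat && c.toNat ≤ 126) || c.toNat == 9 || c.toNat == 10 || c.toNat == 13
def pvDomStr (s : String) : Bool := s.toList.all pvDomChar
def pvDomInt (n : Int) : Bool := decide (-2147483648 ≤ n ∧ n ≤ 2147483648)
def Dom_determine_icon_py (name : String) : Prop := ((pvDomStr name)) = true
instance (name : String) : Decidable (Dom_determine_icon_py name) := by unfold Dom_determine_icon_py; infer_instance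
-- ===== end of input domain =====

-- B replaces A's nested if/elif chain by a flat keyword→icon map: collect all matching icons
-- in one pass, take the first (priority) hit, then refine thermometer → coolant-temperature
-- (objective: simpler).

-- ===== PORT A =====
def determine_icon_py (name : String) : Option String :=
  if name = "" then none
  else
    let nl := PySem.Str.lower name
    if PySem.Str.isIn "temp" nl || PySem.Str.isIn "temperature" nl then
      if PySem.Str.isIn "coolant" nl then some "mdi:coolant-temperature"
      else if PySem.Str.isIn "air" nl || PySem.Str.isIn "intake" nl then some "mdi:thermometer"
      else some "mdi:thermometer"
    else if PySem.Str.isIn "speed" nl then some "mdi:speedometer"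
    else if PySem.Str.isIn "rpm" nl then some "mdi:engine"
    else if PySem.Str.isIn "engine" nl then some "mdi:engine"
    else if PySem.Str.isIn "fuel" nl then some "mdi:gas-station"
    else if PySem.Str.isIn "volt" nl || PySem.Str.isIn "battery" nl then some "mdi:car-battery"
    else none

-- ===== PORT B =====
def pvKeywordIcons : List (String × String) :=
  [ ("temp", "mdi:thermometer"),
    ("speed", "mdi:speedometer"),
    ("rpm", "mdi:engine"),
    ("engine", "mdi:engine"),
    ("fuel", "mdi:gas-station"),
    ("volt", "mdi:car-battery"),
    ("battery", "mdi:car-battery") ]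

def determine_icon_py_alt (name : String) : Option String :=
  let lowered := PySem.Str.lower name
  let hits := (pvKeywordIcons.filter (fun p => PySem.Str.isIn p.1 lowered)).map Prod.snd
  match hits.head? with
  | none => none
  | some icon =>
      if icon = "mdi:thermometer" && PySem.Str.isIn "coolant" lowered then
        some "mdi:coolant-temperature"
      else some icon

-- ===== PRECONDITION & SPEC =====
def Spec_determine_icon_py (name : String) (out : Option String) : Prop := out = determine_icon_py_alt name
instance (name : String) (out : Option String) : Decidable (Spec_determine_icon_py name out) := by unfold Spec_determine_icon_py; infer_instance

-- ===== CLAIM (what is proved, stated in full; the proofs are below) =====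
def Claim_equal_determine_icon_py : Prop := ∀ (name : String), Dom_determine_icon_py name → Spec_determine_icon_py name (determine_icon_py name)

-- ===== LEMMAS AND PROOFS =====

-- "temperature" contains "temp", so the presence of "temperature" implies that of "temp".
theorem pv_temp_of_temperature (nl : String) :
    PySem.Str.isIn "temperature" nl = true → PySem.Str.isIn "temp" nl = true := by
  simp only [PySem.Str.isIn_iff_infix]
  intro h
  exact List.IsInfix.trans (by decide) h

-- ===== VERDICT (by name: the statement is the Claim_ definition above) =====
set_option maxHeartbeats 2000000 in
theorem determine_icon_py_spec : Claim_equal_determine_icon_py := by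
  intro name _
  unfold Spec_determine_icon_py determine_icon_py determine_icon_py_alt pvKeywordIcons
  by_cases hempty : name = ""
  · subst hempty; decide
  · simp only [hempty, if_false]
    cases h1 : PySem.Str.isIn "temp" (PySem.Str.lower name) <;>
    cases hc : PySem.Str.isIn "coolant" (PySem.Str.lower name) <;>
    cases hs : PySem.Str.isIn "speed" (PySem.Str.lower name) <;>
    cases hr : PySem.Str.isIn "rpm" (PySem.Str.lower name) <;>
    cases he : PySem.Str.isIn "engine" (PySem.Str.lower name) <;>
    cases hf : PySem.Str.isIn "fuel" (PySem.Str.lower name) <;>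
    cases hv : PySem.Str.isIn "volt" (PySem.Str.lower name) <;>
    cases hb : PySem.Str.isIn "battery" (PySem.Str.lower name) <;>
    · have h2 : PySem.Str.isIn "temperature" (PySem.Str.lower name) = false ∨
          PySem.Str.isIn "temp" (PySem.Str.lower name) = true := by
        cases h2 : PySem.Str.isIn "temperature" (PySem.Str.lower name)
        · exact Or.inl rfl
        · exact Or.inr (pv_temp_of_temperature _ h2)
      rcases h2 with h2 | h2 <;> simp_all
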